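-- pv_equiv track=rewrite | github.com/leotezeira/bot_telegram_images | prompts.py | parse_caption
-- ===== SOURCE A (Python) =====
-- GENDER_PROMPTS = {
--     "mujer": "young woman, female model, feminine look",
--     "hombre": "young man, male model, masculine look",
--     "unisex": "androgynous model, unisex style",
--     # aliases
--     "femenino": "young woman, female model, feminine look",
--     "masculino": "young man, male model, masculine look",
--     "female": "young woman, female model, feminine look",
--     "male": "young man, male model, masculine look",
--     "woman": "young woman, female model, feminine look",
--     "man": "young man, male model, masculine look",
-- }
--
-- STYLE_PROMPTS = {
--     "casual": "casual relaxed pose, everyday look, natural expression",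
--     "urbano": "urban streetwear style, edgy pose, confident look",
--     "deportivo": "athletic sporty pose, dynamic stance, energetic",
--     "elegante": "elegant pose, sophisticated look, refined style",
--     "streetwear": "streetwear fashion, urban style, cool attitude",
--     # aliases
--     "sport": "athletic sporty pose, dynamic stance, energetic",
--     "urban": "urban streetwear style, edgy pose, confident look",
-- }
--
-- ENVIRONMENT_PROMPTS = {
--     "interior": "indoor studio, clean white studio backdrop, controlled lighting",
--     "exterior": "outdoor natural light, white seamless background, airy feel",
--     "estudio": "professional photography studio, seamless white backdrop, softbox lighting",
--     # default = studio
--     "studio": "professional photography studio, seamless white backdrop, softbox lighting",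
-- }
--
-- LIGHTING_PROMPTS = {
--     "suave": "soft diffused lighting, even illumination, no harsh shadows",
--     "dramatica": "dramatic side lighting, strong contrast, editorial feel",
--     "natural": "natural daylight look, soft shadows, warm tone",
--     "brillante": "bright high-key lighting, crisp clean look, Instagram bright",
-- }
--
-- DEFAULT_GENDER = GENDER_PROMPTS["unisex"]
--
-- DEFAULT_STYLE = STYLE_PROMPTS["casual"]
--
-- DEFAULT_ENVIRONMENT = ENVIRONMENT_PROMPTS["estudio"]
--
-- DEFAULT_LIGHTING = LIGHTING_PROMPTS["suave"]
--
-- def parse_caption(caption: str) -> dict: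
--     """
--     Parsea el caption del usuario y extrae par?metros de customizaci?n.
--     Ejemplo: "mujer urbano exterior" ? {gender, style, environment}
--     """
--     words = caption.lower().split()
--     result = {
--         "gender": DEFAULT_GENDER,
--         "style": DEFAULT_STYLE,
--         "environment": DEFAULT_ENVIRONMENT,
--         "lighting": DEFAULT_LIGHTING,
--     }
--
--     for word in words:
--         if word in GENDER_PROMPTS:
--             result["gender"] = GENDER_PROMPTS[word]
--         elif word in STYLE_PROMPTS:
--             result["style"] = STYLE_PROMPTS[word]
--         elif word in ENVIRONMENT_PROMPTS:
--             result["environment"] = ENVIRONMENT_PROMPTS[word]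
--         elif word in LIGHTING_PROMPTS:
--             result["lighting"] = LIGHTING_PROMPTS[word]
--
--     return result
-- ===== SOURCE B (Python) =====
-- GENDER_PROMPTS = {
--     "mujer": "young woman, female model, feminine look",
--     "hombre": "young man, male model, masculine look",
--     "unisex": "androgynous model, unisex style",
--     "femenino": "young woman, female model, feminine look",
--     "masculino": "young man, male model, masculine look",
--     "female": "young woman, female model, feminine look",
--     "male": "young man, male model, masculine look",
--     "woman": "young woman, female model, feminine look",
--     "man": "young man, male model, masculine look",
-- }
--
-- STYLE_PROMPTS = {
--     "casual": "casual relaxed pose, everyday look, natural expression",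
--     "urbano": "urban streetwear style, edgy pose, confident look",
--     "deportivo": "athletic sporty pose, dynamic stance, energetic",
--     "elegante": "elegant pose, sophisticated look, refined style",
--     "streetwear": "streetwear fashion, urban style, cool attitude",
--     "sport": "athletic sporty pose, dynamic stance, energetic",
--     "urban": "urban streetwear style, edgy pose, confident look",
-- }
--
-- ENVIRONMENT_PROMPTS = {
--     "interior": "indoor studio, clean white studio backdrop, controlled lighting",
--     "exterior": "outdoor natural light, white seamless background, airy feel",
--     "estudio": "professional photography studio, seamless white backdrop, softbox lighting",
--     "studio": "professional photography studio, seamless white backdrop, softbox lighting",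
-- }
--
-- LIGHTING_PROMPTS = {
--     "suave": "soft diffused lighting, even illumination, no harsh shadows",
--     "dramatica": "dramatic side lighting, strong contrast, editorial feel",
--     "natural": "natural daylight look, soft shadows, warm tone",
--     "brillante": "bright high-key lighting, crisp clean look, Instagram bright",
-- }
--
-- DEFAULT_GENDER = GENDER_PROMPTS["unisex"]
-- DEFAULT_STYLE = STYLE_PROMPTS["casual"]
-- DEFAULT_ENVIRONMENT = ENVIRONMENT_PROMPTS["estudio"]
-- DEFAULT_LIGHTING = LIGHTING_PROMPTS["suave"]
--
--
-- def _last_hit(rev_words, table, default):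
--     # first match in the reversed word list = last match in the caption
--     for w in rev_words:
--         if w in table:
--             return table[w]
--     return default
--
--
-- def parse_caption(caption: str) -> dict:
--     # Instead of one forward pass mutating a result dict through an elif
--     # cascade, scan the words BACKWARDS once per category and take the first
--     # hit (the caption's last keyword of that category).  Correct because the
--     # four key sets are pairwise disjoint, so categories are independent and
--     # last-match-wins per category reproduces A's overwriting fold.
--     rev_words = caption.lower().split()[::-1]
--     return {
--         "gender": _last_hit(rev_words, GENDER_PROMPTS, DEFAULT_GENDER),
--         "style": _last_hit(rev_words, STYLE_PROMPTS, DEFAULT_STYLE),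
--         "environment": _last_hit(rev_words, ENVIRONMENT_PROMPTS, DEFAULT_ENVIRONMENT),
--         "lighting": _last_hit(rev_words, LIGHTING_PROMPTS, DEFAULT_LIGHTING),
--     }
-- ===== Notes on version B (the rewrite author's own statement) =====
-- stated objective: alternative
-- what changed: Replaced A's forward fold that mutates a result dict through a four-way elif cascade with four independent backward scans (early-exit search for the caption's last keyword of each category), building the result dict directly from the four answers; correct because the four key sets are pairwise disjoint.
import Mathlib
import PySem

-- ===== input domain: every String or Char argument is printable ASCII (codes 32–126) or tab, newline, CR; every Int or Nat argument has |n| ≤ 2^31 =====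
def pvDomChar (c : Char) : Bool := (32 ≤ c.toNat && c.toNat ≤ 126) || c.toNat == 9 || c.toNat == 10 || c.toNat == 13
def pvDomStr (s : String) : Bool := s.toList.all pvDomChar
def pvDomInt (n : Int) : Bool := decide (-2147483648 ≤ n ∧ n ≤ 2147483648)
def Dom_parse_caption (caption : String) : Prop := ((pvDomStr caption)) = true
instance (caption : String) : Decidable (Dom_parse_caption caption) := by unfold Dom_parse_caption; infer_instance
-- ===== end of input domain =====

-- B replaces A's forward fold with an elif cascade over a mutated result dict by four
-- independent backward scans (early-exit search for the last keyword of each category);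
-- correct because the four key sets are pairwise disjoint (objective: alternative).

-- ===== PORT A =====
def gPairs : List (String × String) :=
  [("mujer", "young woman, female model, feminine look"),
   ("hombre", "young man, male model, masculine look"),
   ("unisex", "androgynous model, unisex style"),
   ("femenino", "young woman, female model, feminine look"),
   ("masculino", "young man, male model, masculine look"),
   ("female", "young woman, female model, feminine look"),
   ("male", "young man, male model, masculine look"),
   ("woman", "young woman, female model, feminine look"),
   ("man", "young man, male model, masculine look")]

def sPairs : List (String × String) :=
  [("casual", "casual relaxed pose, everyday look, natural expression"),
   ("urbano", "urban streetwear style, edgy pose, confident look"),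
   ("deportivo", "athletic sporty pose, dynamic stance, energetic"),
   ("elegante", "elegant pose, sophisticated look, refined style"),
   ("streetwear", "streetwear fashion, urban style, cool attitude"),
   ("sport", "athletic sporty pose, dynamic stance, energetic"),
   ("urban", "urban streetwear style, edgy pose, confident look")]

def ePairs : List (String × String) :=
  [("interior", "indoor studio, clean white studio backdrop, controlled lighting"),
   ("exterior", "outdoor natural light, white seamless background, airy feel"),
   ("estudio", "professional photography studio, seamless white backdrop, softbox lighting"),
   ("studio", "professional photography studio, seamless white backdrop, softbox lighting")]

def lPairs : List (String × String) :=
  [("suave", "soft diffused lighting, even illumination, no harsh shadows"),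
   ("dramatica", "dramatic side lighting, strong contrast, editorial feel"),
   ("natural", "natural daylight look, soft shadows, warm tone"),
   ("brillante", "bright high-key lighting, crisp clean look, Instagram bright")]

def GENDER_PROMPTS : PySem.Dict String String := PySem.Dict.mk gPairs
def STYLE_PROMPTS : PySem.Dict String String := PySem.Dict.mk sPairs
def ENVIRONMENT_PROMPTS : PySem.Dict String String := PySem.Dict.mk ePairs
def LIGHTING_PROMPTS : PySem.Dict String String := PySem.Dict.mk lPairs

-- A's initial result dict of the four defaults
def initResult : PySem.Dict String String :=
  PySem.Dict.mk
    [("gender", "androgynous model, unisex style"),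
     ("style", "casual relaxed pose, everyday look, natural expression"),
     ("environment", "professional photography studio, seamless white backdrop, softbox lighting"),
     ("lighting", "soft diffused lighting, even illumination, no harsh shadows")]

-- A's loop body: the four-way elif cascade ('word in D' then 'D[word]')
def stepA (r : PySem.Dict String String) (w : String) : PySem.Dict String String :=
  match GENDER_PROMPTS.get? w with
  | some v => r.insert "gender" v
  | none =>
    match STYLE_PROMPTS.get? w with
    | some v => r.insert "style" v
    | none =>
      match ENVIRONMENT_PROMPTS.get? w with
      | some v => r.insert "environment" v
      | none =>
        match LIGHTING_PROMPTS.get? w with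
        | some v => r.insert "lighting" v
        | none => r

def parse_caption (caption : String) : List (String × String) :=
  ((PySem.Str.split₀ (PySem.Str.lower caption)).foldl stepA initResult).items

-- ===== PORT B =====
-- B's helper _last_hit: first hit in the (already reversed) word list, else default
def lastHit (revWords : List String) (tbl : PySem.Dict String String) (dflt : String) : String :=
  match revWords with
  | [] => dflt
  | w :: ws =>
    match tbl.get? w with
    | some v => v
    | none => lastHit ws tbl dflt

def parse_caption_alt (caption : String) : List (String × String) :=
  let revWords := (PySem.Str.split₀ (PySem.Str.lower caption)).reverse
  [("gender", lastHit revWords GENDER_PROMPTS "androgynous model, unisex style"),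
   ("style", lastHit revWords STYLE_PROMPTS "casual relaxed pose, everyday look, natural expression"),
   ("environment", lastHit revWords ENVIRONMENT_PROMPTS "professional photography studio, seamless white backdrop, softbox lighting"),
   ("lighting", lastHit revWords LIGHTING_PROMPTS "soft diffused lighting, even illumination, no harsh shadows")]

-- ===== PRECONDITION & SPEC =====
def Spec_parse_caption (caption : String) (out : List (String × String)) : Prop := out = parse_caption_alt caption
instance (caption : String) (out : List (String × String)) : Decidable (Spec_parse_caption caption out) := by unfold Spec_parse_caption; infer_instance

-- ===== CLAIM =====
def Claim_equal_parse_caption : Prop := ∀ (caption : String), Dom_parse_caption caption → Spec_parse_caption caption (parse_caption caption)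

-- ===== LEMMAS AND PROOFS =====
-- the 4-field result dict as a function of its four values
def mk4 (g s e l : String) : PySem.Dict String String :=
  PySem.Dict.mk [("gender", g), ("style", s), ("environment", e), ("lighting", l)]

-- one word's effect on each field (A's cascade), per category
def upd (tbl : PySem.Dict String String) (d w : String) : String :=
  match tbl.get? w with
  | some v => v
  | none => d

theorem lastHit_append (xs : List String) (w : String) (tbl : PySem.Dict String String) (d : String) :
    lastHit (xs ++ [w]) tbl d = lastHit xs tbl (upd tbl d w) := by
  induction xs with
  | nil => simp [lastHit, upd]
  | cons x xs ih =>
    simp only [List.cons_append, lastHit, ih]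

-- A's elif cascade on a 4-field dict = four independent per-category updates
-- (the four key sets are pairwise disjoint, so at most one branch fires)
set_option maxHeartbeats 2000000 in
theorem stepA_mk4 (g s e l w : String) :
    stepA (mk4 g s e l) w =
      mk4 (upd GENDER_PROMPTS g w) (upd STYLE_PROMPTS s w)
          (upd ENVIRONMENT_PROMPTS e w) (upd LIGHTING_PROMPTS l w) := by
  simp only [stepA, upd, mk4, GENDER_PROMPTS, STYLE_PROMPTS, ENVIRONMENT_PROMPTS,
    LIGHTING_PROMPTS, gPairs, sPairs, ePairs, lPairs, PySem.Dict.get?_mk_cons]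
  by_cases h0 : ("mujer" == w) = true
  · cases eq_of_beq h0; rfl
  rw [if_neg h0]
  by_cases h1 : ("hombre" == w) = true
  · cases eq_of_beq h1; rfl
  rw [if_neg h1]
  by_cases h2 : ("unisex" == w) = true
  · cases eq_of_beq h2; rfl
  rw [if_neg h2]
  by_cases h3 : ("femenino" == w) = true
  · cases eq_of_beq h3; rfl
  rw [if_neg h3]
  by_cases h4 : ("masculino" == w) = true
  · cases eq_of_beq h4; rfl
  rw [if_neg h4]
  by_cases h5 : ("female" == w) = true
  · cases eq_of_beq h5; rfl
  rw [if_neg h5]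
  by_cases h6 : ("male" == w) = true
  · cases eq_of_beq h6; rfl
  rw [if_neg h6]
  by_cases h7 : ("woman" == w) = true
  · cases eq_of_beq h7; rfl
  rw [if_neg h7]
  by_cases h8 : ("man" == w) = true
  · cases eq_of_beq h8; rfl
  rw [if_neg h8]
  by_cases h9 : ("casual" == w) = true
  · cases eq_of_beq h9; rfl
  rw [if_neg h9]
  by_cases h10 : ("urbano" == w) = true
  · cases eq_of_beq h10; rfl
  rw [if_neg h10]
  by_cases h11 : ("deportivo" == w) = true
  · cases eq_of_beq h11; rfl
  rw [if_neg h11]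
  by_cases h12 : ("elegante" == w) = true
  · cases eq_of_beq h12; rfl
  rw [if_neg h12]
  by_cases h13 : ("streetwear" == w) = true
  · cases eq_of_beq h13; rfl
  rw [if_neg h13]
  by_cases h14 : ("sport" == w) = true
  · cases eq_of_beq h14; rfl
  rw [if_neg h14]
  by_cases h15 : ("urban" == w) = true
  · cases eq_of_beq h15; rfl
  rw [if_neg h15]
  by_cases h16 : ("interior" == w) = true
  · cases eq_of_beq h16; rfl
  rw [if_neg h16]
  by_cases h17 : ("exterior" == w) = true
  · cases eq_of_beq h17; rfl
  rw [if_neg h17]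
  by_cases h18 : ("estudio" == w) = true
  · cases eq_of_beq h18; rfl
  rw [if_neg h18]
  by_cases h19 : ("studio" == w) = true
  · cases eq_of_beq h19; rfl
  rw [if_neg h19]
  by_cases h20 : ("suave" == w) = true
  · cases eq_of_beq h20; rfl
  rw [if_neg h20]
  by_cases h21 : ("dramatica" == w) = true
  · cases eq_of_beq h21; rfl
  rw [if_neg h21]
  by_cases h22 : ("natural" == w) = true
  · cases eq_of_beq h22; rfl
  rw [if_neg h22]
  by_cases h23 : ("brillante" == w) = true
  · cases eq_of_beq h23; rfl
  rw [if_neg h23]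
  rfl

-- the fold over A's cascade computes, per field, the last match of that category
theorem fold_items (ws : List String) (g s e l : String) :
    ((ws.foldl stepA (mk4 g s e l)).items) =
      [("gender", lastHit ws.reverse GENDER_PROMPTS g),
       ("style", lastHit ws.reverse STYLE_PROMPTS s),
       ("environment", lastHit ws.reverse ENVIRONMENT_PROMPTS e),
       ("lighting", lastHit ws.reverse LIGHTING_PROMPTS l)] := by
  induction ws generalizing g s e l with
  | nil => rfl
  | cons w ws ih =>
    simp only [List.foldl_cons, stepA_mk4, ih, List.reverse_cons, lastHit_append]

-- ===== VERDICT =====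
theorem parse_caption_spec : Claim_equal_parse_caption := by
  intro caption _
  unfold Spec_parse_caption parse_caption parse_caption_alt
  have : initResult = mk4 "androgynous model, unisex style"
      "casual relaxed pose, everyday look, natural expression"
      "professional photography studio, seamless white backdrop, softbox lighting"
      "soft diffused lighting, even illumination, no harsh shadows" := rfl
  rw [this, fold_items]
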